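-- pv_equiv track=rewrite | github.com/pabloschwarzenberg/grader | hito2_ej3/hito2_ej3_f27690a72410ffc46ac87be52f2b0352.py | encontrar_subsecuencias_unicas
-- ===== SOURCE A (Python) =====
-- def encontrar_subsecuencias_unicas(secuencia, n):
--     subsecuencias = set()
--     subsecuencias_repetidas = set()
--
--     # Recorrer la secuencia y encontrar las subsecuencias de longitud n
--     for i in range(len(secuencia) - n + 1):
--         subsecuencia = secuencia[i:i + n]
--         if subsecuencia in subsecuencias:
--             subsecuencias_repetidas.add(subsecuencia)
--         else:
--             subsecuencias.add(subsecuencia)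
--
--     # Filtrar las subsecuencias únicas
--     subsecuencias_unicas = subsecuencias - subsecuencias_repetidas
--
--     return subsecuencias_unicas
-- ===== SOURCE B (Python) =====
-- def encontrar_subsecuencias_unicas(secuencia, n):
--     m = len(secuencia) - n + 1
--     unicas = set()
--     for i in range(m):
--         sub = secuencia[i:i + n]
--         if all(secuencia[j:j + n] != sub for j in range(m) if j != i):
--             unicas.add(sub)
--     return unicas
-- ===== Notes on version B (the rewrite author's own statement) =====
-- stated objective: alternative
-- what changed: Replaces the streaming two-set seen/repeated scheme and final set difference by a direct brute-force uniqueness test: a window is added exactly when a full scan over all other window positions finds no equal slice, so no auxiliary seen/repeated state is kept at all.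
import Mathlib
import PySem

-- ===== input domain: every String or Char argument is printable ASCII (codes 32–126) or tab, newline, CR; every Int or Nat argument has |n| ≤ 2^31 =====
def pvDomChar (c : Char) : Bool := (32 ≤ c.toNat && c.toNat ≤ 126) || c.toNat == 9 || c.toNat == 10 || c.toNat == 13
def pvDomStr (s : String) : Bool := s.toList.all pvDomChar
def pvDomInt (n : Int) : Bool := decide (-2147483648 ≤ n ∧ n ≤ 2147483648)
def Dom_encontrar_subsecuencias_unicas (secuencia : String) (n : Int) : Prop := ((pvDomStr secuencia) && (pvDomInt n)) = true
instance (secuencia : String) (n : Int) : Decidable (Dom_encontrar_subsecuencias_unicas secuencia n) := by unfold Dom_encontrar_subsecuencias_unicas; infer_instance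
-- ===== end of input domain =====

-- B drops A's streaming seen/repeated sets and final set difference: it decides each window's
-- uniqueness directly by a full scan over all other window positions (brute force, no auxiliary
-- state); alternative decomposition, not faster.

-- ===== PORT A =====
def encontrar_subsecuencias_unicas (secuencia : String) (n : Int) : List String :=
  let st := (PySem.List.pyRange 0 (PySem.Str.len secuencia - n + 1) 1).foldl
    (fun (st : PySem.Set String × PySem.Set String) i =>
      let sub := PySem.Str.slice secuencia (some i) (some (i + n))
      if PySem.Set.contains st.1 sub then (st.1, PySem.Set.add st.2 sub)
      else (PySem.Set.add st.1 sub, st.2))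
    (PySem.Set.empty, PySem.Set.empty)
  PySem.Set.diff st.1 st.2

-- ===== PORT B =====
-- Python's all(<gen>) stops at the first failing element; this structural recursion evaluates
-- the same conjunction with the same early exit (it equals List.all, lemma pvAll_eq_all below).
def pvAll (p : Int → Bool) : List Int → Bool
  | [] => true
  | j :: t => if p j then pvAll p t else false

def encontrar_subsecuencias_unicas_alt (secuencia : String) (n : Int) : List String :=
  let m := PySem.Str.len secuencia - n + 1
  let r := PySem.List.pyRange 0 m 1
  r.foldl
    (fun (unicas : PySem.Set String) i =>
      let sub := PySem.Str.slice secuencia (some i) (some (i + n))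
      -- 'all(… for j in range(m) if j != i)': the 'if j != i' guard is the left disjunct
      if pvAll (fun j => (j == i) || !(PySem.Str.slice secuencia (some j) (some (j + n)) == sub)) r
      then PySem.Set.add unicas sub else unicas)
    PySem.Set.empty

-- ===== PRECONDITION & SPEC =====
def Spec_encontrar_subsecuencias_unicas (secuencia : String) (n : Int) (out : List String) : Prop := out = encontrar_subsecuencias_unicas_alt secuencia n
instance (secuencia : String) (n : Int) (out : List String) : Decidable (Spec_encontrar_subsecuencias_unicas secuencia n out) := by unfold Spec_encontrar_subsecuencias_unicas; infer_instance

-- ===== CLAIM (what is proved, stated in full; the proofs are below) =====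
def Claim_equal_encontrar_subsecuencias_unicas : Prop := ∀ (secuencia : String) (n : Int), Dom_encontrar_subsecuencias_unicas secuencia n → Spec_encontrar_subsecuencias_unicas secuencia n (encontrar_subsecuencias_unicas secuencia n)

-- ===== LEMMAS AND PROOFS =====

-- A's loop state after processing a list of substrings: seen = set(L), and
-- repeated contains exactly the elements occurring at least twice in L.
lemma seen_repeated_spec (L : List String) :
    (L.foldl
      (fun (st : PySem.Set String × PySem.Set String) s =>
        if PySem.Set.contains st.1 s then (st.1, PySem.Set.add st.2 s)
        else (PySem.Set.add st.1 s, st.2))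
      (PySem.Set.empty, PySem.Set.empty)).1 = PySem.Set.ofList L
  ∧ ∀ x, x ∈ (L.foldl
      (fun (st : PySem.Set String × PySem.Set String) s =>
        if PySem.Set.contains st.1 s then (st.1, PySem.Set.add st.2 s)
        else (PySem.Set.add st.1 s, st.2))
      (PySem.Set.empty, PySem.Set.empty)).2 ↔ 2 ≤ L.count x := by
  induction L using List.reverseRecOn with
  | nil => simp [PySem.Set.ofList, PySem.Set.empty]
  | append_singleton M a ih =>
    rw [List.foldl_append]
    obtain ⟨h1, h2⟩ := ih
    simp only [List.foldl_cons, List.foldl_nil]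
    have hca : ∀ x : String, List.count x [a] = if x = a then 1 else 0 := by
      intro x
      by_cases hx : x = a
      · subst hx; simp
      · rw [if_neg hx]
        exact List.count_eq_zero.mpr (by simp [hx])
    by_cases hmem : a ∈ PySem.Set.ofList M
    · have hc : PySem.Set.contains (M.foldl
        (fun (st : PySem.Set String × PySem.Set String) s =>
          if PySem.Set.contains st.1 s then (st.1, PySem.Set.add st.2 s)
          else (PySem.Set.add st.1 s, st.2))
        (PySem.Set.empty, PySem.Set.empty)).1 a = true := by
        rw [h1, PySem.Set.contains_iff]; exact hmem
      rw [if_pos hc]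
      have haM : a ∈ M := (PySem.Set.mem_ofList M a).mp hmem
      have hcnt : 1 ≤ M.count a := List.one_le_count_iff.mpr haM
      refine ⟨by rw [h1, PySem.Set.ofList_append_singleton, PySem.Set.add_of_mem hmem], ?_⟩
      intro x
      rw [PySem.Set.mem_add, h2 x, List.count_append, hca x]
      by_cases hx : x = a
      · subst hx
        rw [if_pos rfl]
        exact ⟨fun _ => by omega, fun _ => Or.inr rfl⟩
      · rw [if_neg hx]
        constructor
        · rintro (h | h)
          · omega
          · exact absurd h hx
        · intro h; exact Or.inl (by omega)
    · have hc : PySem.Set.contains (M.foldl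
        (fun (st : PySem.Set String × PySem.Set String) s =>
          if PySem.Set.contains st.1 s then (st.1, PySem.Set.add st.2 s)
          else (PySem.Set.add st.1 s, st.2))
        (PySem.Set.empty, PySem.Set.empty)).1 a = false := by
        rw [h1]
        exact (Bool.not_eq_true _).mp
          (fun h => hmem ((PySem.Set.contains_iff _ _).mp h))
      rw [if_neg (fun h => Bool.false_ne_true (hc ▸ h))]
      have haM : a ∉ M := fun h => hmem ((PySem.Set.mem_ofList M a).mpr h)
      have hcnt : M.count a = 0 := List.count_eq_zero.mpr haM
      refine ⟨by rw [h1, PySem.Set.ofList_append_singleton], ?_⟩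
      intro x
      rw [h2 x, List.count_append, hca x]
      by_cases hx : x = a
      · subst hx; rw [if_pos rfl]; omega
      · rw [if_neg hx]; omega

lemma pvAll_eq_all (p : Int → Bool) (l : List Int) : pvAll p l = l.all p := by
  induction l with
  | nil => rfl
  | cons j t ih =>
    by_cases h : p j = true
    · simp [pvAll, h, ih]
    · simp [pvAll, h]

-- B's loop shape: conditionally adding f i collapses to folding Set.add over the
-- filtered-then-mapped index list.
lemma foldl_if_add {α β : Type} [BEq α] (p : β → Bool) (f : β → α) :
    ∀ (M : List β) (s0 : PySem.Set α),
      M.foldl (fun s i => if p i then PySem.Set.add s (f i) else s) s0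
        = ((M.filter p).map f).foldl PySem.Set.add s0 := by
  intro M
  induction M with
  | nil => intro s0; rfl
  | cons a M ih =>
    intro s0
    by_cases hp : p a = true
    · simp [hp, ih]
    · simp [hp, ih]

-- countP = 1 on a nodup list with a known passing element i means no other element passes.
lemma countP_eq_one_iff {β : Type} (p : β → Bool) (r : List β) (hr : r.Nodup)
    (i : β) (hi : i ∈ r) (hpi : p i = true) :
    r.countP p = 1 ↔ ∀ j ∈ r, j ≠ i → p j = false := by
  obtain ⟨r1, r2, rfl⟩ := List.append_of_mem hi
  have hnd := hr
  rw [List.nodup_append] at hnd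
  have hi1 : i ∉ r1 := fun h => hnd.2.2 i h i (List.mem_cons_self) rfl
  have hi2 : i ∉ r2 := by
    have := hnd.2.1
    rw [List.nodup_cons] at this
    exact this.1
  rw [List.countP_append, List.countP_cons, hpi, if_pos rfl]
  constructor
  · intro h j hj hne
    have h1 : r1.countP p = 0 := by omega
    have h2 : r2.countP p = 0 := by omega
    rcases List.mem_append.mp hj with hj1 | hj2
    · simpa using List.countP_eq_zero.mp h1 j hj1
    · rcases List.mem_cons.mp hj2 with rfl | hj2
      · exact absurd rfl hne
      · simpa using List.countP_eq_zero.mp h2 j hj2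
  · intro h
    have h1 : r1.countP p = 0 :=
      List.countP_eq_zero.mpr fun j hj => by
        simp [h j (List.mem_append.mpr (Or.inl hj)) (fun he => hi1 (he ▸ hj))]
    have h2 : r2.countP p = 0 :=
      List.countP_eq_zero.mpr fun j hj => by
        simp [h j (List.mem_append.mpr (Or.inr (List.mem_cons_of_mem _ hj)))
          (fun he => hi2 (he ▸ hj))]
    omega

-- Filtering set(L) by a predicate that only holds on count-≤-1 elements equals filtering L itself.
lemma filter_ofList_of_count_le_one (p : String → Bool) :
    ∀ M : List String, (∀ s, p s = true → M.count s ≤ 1) →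
      (PySem.Set.ofList M).filter p = M.filter p := by
  intro M
  induction M using List.reverseRecOn with
  | nil => intro _; rfl
  | append_singleton K a ih =>
    intro h
    have hK : ∀ s, p s = true → K.count s ≤ 1 := by
      intro s hs
      have := h s hs
      rw [List.count_append] at this
      omega
    rw [PySem.Set.ofList_append_singleton]
    by_cases hmem : a ∈ K
    · have hpa : p a = false := by
        by_contra hpa
        have hpa' : p a = true := by
          cases hq : p a
          · exact absurd hq hpa
          · rfl
        have := h a hpa'
        rw [List.count_append] at this
        have h1 : 1 ≤ K.count a := List.one_le_count_iff.mpr hmem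
        simp at this
        omega
      rw [PySem.Set.add_of_mem ((PySem.Set.mem_ofList K a).mpr hmem)]
      rw [List.filter_append, ih hK]
      simp [hpa]
    · rw [PySem.Set.add_of_not_mem (fun hx => hmem ((PySem.Set.mem_ofList K a).mp hx))]
      rw [List.filter_append, List.filter_append, ih hK]

-- ===== VERDICT (by name: the statement is the Claim_ definition above) =====
theorem encontrar_subsecuencias_unicas_spec : Claim_equal_encontrar_subsecuencias_unicas := by
  intro secuencia n _
  unfold Spec_encontrar_subsecuencias_unicas
  simp only [encontrar_subsecuencias_unicas, encontrar_subsecuencias_unicas_alt]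
  set f : Int → String := fun i => PySem.Str.slice secuencia (some i) (some (i + n)) with hf
  set r : List Int := PySem.List.pyRange 0 (PySem.Str.len secuencia - n + 1) 1 with hrdef
  set L : List String := r.map f with hL
  set p : String → Bool := fun s => L.count s == 1 with hp
  have hnodup : r.Nodup := hrdef ▸ PySem.List.nodup_pyRange_one _ _
  have hple : ∀ s, p s = true → L.count s ≤ 1 := by
    intro s hs
    rw [hp] at hs
    simp only [beq_iff_eq] at hs
    omega
  -- the condition B tests at index i ∈ r is exactly "f i occurs once among the windows"
  have hcond : ∀ i ∈ r,
      (pvAll (fun j => (j == i) || !(f j == f i)) r) = p (f i) := by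
    intro i hi
    rw [pvAll_eq_all]
    have hcount : L.count (f i) = r.countP (fun j => f j == f i) := by
      rw [hL, List.count_eq_countP, List.countP_map]
      rfl
    have hiff := countP_eq_one_iff (fun j => f j == f i) r hnodup i hi (by simp)
    have hall : (r.all (fun j => (j == i) || !(f j == f i))) = true
        ↔ ∀ j ∈ r, j ≠ i → ((fun j => f j == f i) j) = false := by
      rw [List.all_eq_true]
      constructor
      · intro h j hj hne
        have := h j hj
        simp only [Bool.or_eq_true, beq_iff_eq, Bool.not_eq_true', beq_eq_false_iff_ne] at this
        exact beq_eq_false_iff_ne.mpr (this.resolve_left hne)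
      · intro h j hj
        by_cases hje : j = i
        · simp [hje]
        · have := h j hj hje
          simp [this]
    have : (r.all (fun j => (j == i) || !(f j == f i))) = true
        ↔ p (f i) = true := by
      rw [hall, ← hiff, hp]
      simp only [beq_iff_eq, ← hcount]
    cases hq : p (f i)
    · cases hq' : (r.all (fun j => (j == i) || !(f j == f i)))
      · rfl
      · exact absurd (this.mp hq') (by simp [hq])
    · exact this.mpr hq
  -- B collapses to filtering the window list by p
  rw [foldl_if_add, List.filter_congr hcond]
  have hnodupF : (L.filter p).Nodup := by
    rw [List.nodup_iff_count_le_one]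
    intro a
    cases hq : p a
    · rw [List.count_eq_zero.mpr (fun hmem => by
        have := (List.mem_filter.mp hmem).2
        rw [hq] at this
        exact Bool.false_ne_true this)]
      omega
    · rw [List.count_filter hq]
      exact hple a hq
  have hmap : List.map f (List.filter (fun x => p (f x)) r) = L.filter p := by
    rw [hL, List.filter_map]
    rfl
  have hofl : List.foldl PySem.Set.add PySem.Set.empty (L.filter p)
      = PySem.Set.ofList (L.filter p) := (PySem.Set.ofList_eq_foldl _).symm
  rw [hmap, hofl, PySem.Set.ofList_eq_self_of_nodup _ hnodupF]
  -- A collapses to the same filter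
  obtain ⟨h1, h2⟩ := seen_repeated_spec L
  rw [← List.foldl_map (f := f)
        (g := fun (st : PySem.Set String × PySem.Set String) s =>
          if PySem.Set.contains st.1 s then (st.1, PySem.Set.add st.2 s)
          else (PySem.Set.add st.1 s, st.2)), ← hL]
  show PySem.Set.diff _ _ = _
  rw [PySem.Set.diff, h1]
  have hAB : (PySem.Set.ofList L).filter
      (fun x => !(PySem.Set.contains (L.foldl
        (fun (st : PySem.Set String × PySem.Set String) s =>
          if PySem.Set.contains st.1 s then (st.1, PySem.Set.add st.2 s)
          else (PySem.Set.add st.1 s, st.2))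
        (PySem.Set.empty, PySem.Set.empty)).2 x)) = (PySem.Set.ofList L).filter p := by
    apply List.filter_congr
    intro x hx
    have hxL : x ∈ L := (PySem.Set.mem_ofList L x).mp hx
    have h1c : 1 ≤ L.count x := List.one_le_count_iff.mpr hxL
    by_cases hr2 : 2 ≤ L.count x
    · have hct := (PySem.Set.contains_iff _ x).mpr ((h2 x).mpr hr2)
      rw [hct, hp]
      simp only [Bool.not_true]
      symm
      exact beq_eq_false_iff_ne.mpr (by omega)
    · have hcf : PySem.Set.contains (L.foldl
          (fun (st : PySem.Set String × PySem.Set String) s =>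
            if PySem.Set.contains st.1 s then (st.1, PySem.Set.add st.2 s)
            else (PySem.Set.add st.1 s, st.2))
          (PySem.Set.empty, PySem.Set.empty)).2 x = false :=
        (Bool.not_eq_true _).mp (fun h => hr2 ((h2 x).mp ((PySem.Set.contains_iff _ x).mp h)))
      rw [hcf, hp]
      simp only [Bool.not_false]
      symm
      exact beq_iff_eq.mpr (by omega)
  rw [hAB, filter_ofList_of_count_le_one p L hple]
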